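-- pv_equiv track=rewrite | github.com/janev94/DASH-Test | scripts/net_utils.py | count_oscillations_cwnd
-- ===== SOURCE A (Python) =====
-- def count_oscillations_cwnd(values): # returns the number of oscillations in the value list (cwnd)
--     changes = 0
--     if(len(values) < 2):
--         return 0
--     direction = int(values[1] > values[0]) # 1 - increasing, 0 - decreasing
--
--     for idx in range(1, len(values) - 1):
--         if direction:
--             if values[idx][1] > values[idx + 1][1]:
--                 direction = not direction
--                 changes += 1
--         else:
--             if values[idx][1] < values[idx + 1][1]:
--                 direction = not direction
--                 changes += 1
--
--     return changes
-- ===== SOURCE B (Python) =====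
-- def count_oscillations_cwnd(values):
--     # Two-phase: build the compressed list of strict step directions, then
--     # count adjacent transitions; equal steps are skipped, seed compares tuples.
--     if len(values) < 2:
--         return 0
--     dirs = [int(values[1] > values[0])]
--     for a, b in zip(values[1:], values[2:]):
--         if a[1] < b[1]:
--             dirs.append(1)
--         elif a[1] > b[1]:
--             dirs.append(0)
--     return sum(int(x != y) for x, y in zip(dirs, dirs[1:]))
-- ===== Notes on version B (the rewrite author's own statement) =====
-- stated objective: alternative
-- what changed: Replaced A's flip-on-opposition state machine (mutable direction flag + counter over index range) by a two-phase computation: build a compressed list of strict step directions seeded with the tuple comparison, then count adjacent differing pairs.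
import Mathlib
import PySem

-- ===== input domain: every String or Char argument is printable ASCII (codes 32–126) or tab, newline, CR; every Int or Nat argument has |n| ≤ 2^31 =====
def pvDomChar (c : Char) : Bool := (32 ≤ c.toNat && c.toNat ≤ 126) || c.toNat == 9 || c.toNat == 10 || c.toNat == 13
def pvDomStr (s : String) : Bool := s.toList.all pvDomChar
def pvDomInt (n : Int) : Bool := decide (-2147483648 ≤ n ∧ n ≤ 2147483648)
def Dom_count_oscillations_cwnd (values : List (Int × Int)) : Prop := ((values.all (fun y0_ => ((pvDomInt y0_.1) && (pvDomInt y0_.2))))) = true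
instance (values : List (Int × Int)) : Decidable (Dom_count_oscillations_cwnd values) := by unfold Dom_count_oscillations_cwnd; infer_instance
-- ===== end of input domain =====

-- B replaces A's flip-on-opposition state machine by building a compressed list of
-- strict step directions and counting adjacent transitions (alternative decomposition,
-- same cost). Exact Python tuple comparison for the seed: lexicographic '>'.
def pvPairGt (p q : Int × Int) : Bool :=
  decide (q.1 < p.1) || (p.1 == q.1 && decide (q.2 < p.2))

-- ===== PORT A =====
def count_oscillations_cwnd (values : List (Int × Int)) : Int :=
  if (PySem.List.len values) < 2 then 0
  else
    let direction : Bool := pvPairGt (PySem.List.pyGetD values 1 (0, 0)) (PySem.List.pyGetD values 0 (0, 0))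
    let st := (PySem.List.pyRange 1 (PySem.List.len values - 1) 1).foldl
      (fun (st : Bool × Int) idx =>
        if st.1 then
          (if (PySem.List.pyGetD values idx (0, 0)).2 > (PySem.List.pyGetD values (idx + 1) (0, 0)).2
            then (!st.1, st.2 + 1) else st)
        else
          (if (PySem.List.pyGetD values idx (0, 0)).2 < (PySem.List.pyGetD values (idx + 1) (0, 0)).2
            then (!st.1, st.2 + 1) else st))
      (direction, (0 : Int))
    st.2

-- ===== PORT B =====
def count_oscillations_cwnd_alt (values : List (Int × Int)) : Int :=
  if (PySem.List.len values) < 2 then 0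
  else
    let seed : Int :=
      if pvPairGt (PySem.List.pyGetD values 1 (0, 0)) (PySem.List.pyGetD values 0 (0, 0)) then 1 else 0
    let dirs := ((PySem.List.slice values (some 1) none).zip (PySem.List.slice values (some 2) none)).foldl
      (fun (acc : List Int) ab =>
        if ab.1.2 < ab.2.2 then acc ++ [1]
        else if ab.1.2 > ab.2.2 then acc ++ [0]
        else acc)
      [seed]
    (dirs.zip dirs.tail).foldl (fun acc xy => acc + (if xy.1 ≠ xy.2 then 1 else 0)) 0

-- ===== PRECONDITION & SPEC =====
def Spec_count_oscillations_cwnd (values : List (Int × Int)) (out : Int) : Prop := out = count_oscillations_cwnd_alt values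
instance (values : List (Int × Int)) (out : Int) : Decidable (Spec_count_oscillations_cwnd values out) := by unfold Spec_count_oscillations_cwnd; infer_instance

-- ===== CLAIM (what is proved, stated in full; the proofs are below) =====
def Claim_equal_count_oscillations_cwnd : Prop := ∀ (values : List (Int × Int)), Dom_count_oscillations_cwnd values → Spec_count_oscillations_cwnd values (count_oscillations_cwnd values)

-- ===== LEMMAS AND PROOFS =====

-- compressed list of strict step directions along the tail (proof-side characterisation)
def pvDirs : List (Int × Int) → List Int
  | a :: b :: t => (if a.2 < b.2 then [(1 : Int)] else if b.2 < a.2 then [(0 : Int)] else []) ++ pvDirs (b :: t)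
  | _ => []

-- number of adjacent transitions, given the previous direction
def pvTrans : Int → List Int → Int
  | _, [] => 0
  | p, x :: t => (if p ≠ x then 1 else 0) + pvTrans x t

-- A's loop as structural recursion over the tail of values
def pvLoopA : Bool → Int → List (Int × Int) → Int
  | true, ch, a :: b :: t =>
    if a.2 > b.2 then pvLoopA false (ch + 1) (b :: t) else pvLoopA true ch (b :: t)
  | false, ch, a :: b :: t =>
    if a.2 < b.2 then pvLoopA true (ch + 1) (b :: t) else pvLoopA false ch (b :: t)
  | _, ch, _ => ch

-- A's index fold equals the structural recursion pvLoopA on the corresponding suffix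
theorem pvFoldA_eq_loopA (values : List (Int × Int)) :
    ∀ (l : List (Int × Int)) (k : Nat) (dir : Bool) (ch : Int),
      values.drop k = l →
      ((PySem.List.pyRange (k : Int) ((values.length : Int) - 1) 1).foldl
        (fun (st : Bool × Int) idx =>
          if st.1 then
            (if (PySem.List.pyGetD values idx (0, 0)).2 > (PySem.List.pyGetD values (idx + 1) (0, 0)).2
              then (!st.1, st.2 + 1) else st)
          else
            (if (PySem.List.pyGetD values idx (0, 0)).2 < (PySem.List.pyGetD values (idx + 1) (0, 0)).2
              then (!st.1, st.2 + 1) else st))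
        (dir, ch)).2 = pvLoopA dir ch l := by
  intro l
  induction l with
  | nil =>
    intro k dir ch hdrop
    have hlen : values.length ≤ k := by
      have := congrArg List.length hdrop; simpa [List.length_drop] using Nat.le_of_sub_eq_zero (by simpa using this)
    rw [PySem.List.pyRange_one_eq_nil (by omega)]
    simp [pvLoopA]
  | cons a l' ih =>
    intro k dir ch hdrop
    have hk : k < values.length := by
      by_contra h
      rw [List.drop_eq_nil_of_le (by omega)] at hdrop
      simp at hdrop
    have hget_a : values.getD k (0, 0) = a := by
      have : values.drop k = a :: l' := hdrop
      have h0 : values[k]? = some a := by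
        have := congrArg (fun t => t.head?) this
        simpa [List.head?_drop] using this
      simp [List.getD, h0]
    match l', ih with
    | [], _ =>
      have hlen : values.length = k + 1 := by
        have := congrArg List.length hdrop; simp [List.length_drop] at this; omega
      rw [PySem.List.pyRange_one_eq_nil (by omega)]
      simp [pvLoopA]
    | b :: t, ih =>
      have hlen : k + 2 ≤ values.length := by
        have := congrArg List.length hdrop; simp [List.length_drop] at this; omega
      have hdrop' : values.drop (k + 1) = b :: t := by
        have := congrArg List.tail hdrop
        simpa [← List.drop_one, List.drop_drop, Nat.add_comm] using this
      have hget_b : values.getD (k + 1) (0, 0) = b := by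
        have h0 : values[k + 1]? = some b := by
          have := congrArg (fun t => t.head?) hdrop'
          simpa [List.head?_drop] using this
        simp [List.getD, h0]
      rw [PySem.List.pyRange_one_cons (by omega)]
      rw [List.foldl_cons]
      have hcast : ((k : Int) + 1) = ((k + 1 : Nat) : Int) := by push_cast; ring
      simp only [hcast, PySem.List.pyGetD_natCast, hget_a, hget_b]
      by_cases hdir : dir
      · subst hdir
        by_cases hc : b.2 < a.2
        · simp only [pvLoopA, gt_iff_lt, if_pos hc, Bool.not_true]
          exact ih (k + 1) false (ch + 1) hdrop'
        · simp only [pvLoopA, gt_iff_lt, if_neg hc]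
          exact ih (k + 1) true ch hdrop'
      · simp only [Bool.not_eq_true] at hdir; subst hdir
        by_cases hc : a.2 < b.2
        · simp only [pvLoopA, Bool.false_eq_true, if_false, if_pos hc, Bool.not_false]
          exact ih (k + 1) true (ch + 1) hdrop'
        · simp only [pvLoopA, Bool.false_eq_true, if_false, if_neg hc]
          exact ih (k + 1) false ch hdrop'

-- the state machine counts exactly the transitions of the compressed direction list
theorem pvLoopA_eq_trans :
    ∀ (l : List (Int × Int)) (dir : Bool) (ch : Int),
      pvLoopA dir ch l = ch + pvTrans (if dir then 1 else 0) (pvDirs l) := by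
  intro l
  induction l with
  | nil => intro dir ch; simp [pvLoopA, pvDirs, pvTrans]
  | cons a l' ih =>
    intro dir ch
    match l' with
    | [] => simp [pvLoopA, pvDirs, pvTrans]
    | b :: t =>
      by_cases hdir : dir
      · subst hdir
        by_cases hgt : a.2 > b.2
        · have hlt : ¬ a.2 < b.2 := by omega
          simp only [pvLoopA, pvDirs, if_pos hgt, if_neg hlt, gt_iff_lt] at *
          rw [ih false (ch + 1)]
          simp [pvTrans]; ring
        · simp only [pvLoopA, pvDirs, if_neg hgt, gt_iff_lt] at *
          rw [ih true ch]
          by_cases hlt : a.2 < b.2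
          · simp [hlt, pvTrans]
          · simp [hlt]
      · simp only [Bool.not_eq_true] at hdir; subst hdir
        by_cases hlt : a.2 < b.2
        · simp only [pvLoopA, pvDirs, Bool.false_eq_true, if_false, if_pos hlt] at *
          rw [ih true (ch + 1)]
          simp [pvTrans]; ring
        · simp only [pvLoopA, pvDirs, Bool.false_eq_true, if_false, if_neg hlt] at *
          rw [ih false ch]
          by_cases hgt : b.2 < a.2
          · simp [hgt, pvTrans]
          · simp [hgt]

-- B's appending fold builds the seed followed by the compressed direction list
theorem pvDirsFold_eq (l : List (Int × Int)) :
    ∀ (init : List Int),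
      ((l.zip l.tail).foldl
        (fun (acc : List Int) ab =>
          if ab.1.2 < ab.2.2 then acc ++ [1]
          else if ab.1.2 > ab.2.2 then acc ++ [0]
          else acc) init) = init ++ pvDirs l := by
  induction l with
  | nil => intro init; simp [pvDirs]
  | cons a l' ih =>
    intro init
    match l' with
    | [] => simp [pvDirs]
    | b :: t =>
      simp only [List.tail_cons] at ih
      simp only [List.tail_cons, List.zip_cons_cons, List.foldl_cons, pvDirs]
      by_cases hlt : a.2 < b.2
      · rw [if_pos hlt, ih]; simp [hlt]
      · by_cases hgt : a.2 > b.2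
        · rw [if_neg hlt, if_pos hgt, ih]
          have : ¬ b.2 ≤ a.2 → False := by omega
          simp [hlt, show b.2 < a.2 from hgt]
        · rw [if_neg hlt, if_neg hgt, ih]
          simp [hlt, show ¬ b.2 < a.2 from by omega]

-- counting adjacent differing pairs of (p :: ds) is pvTrans p ds
theorem pvZipCount_eq_trans :
    ∀ (ds : List Int) (p : Int) (acc : Int),
      (((p :: ds).zip ds).foldl (fun acc xy => acc + (if xy.1 ≠ xy.2 then 1 else 0)) acc)
        = acc + pvTrans p ds := by
  intro ds
  induction ds with
  | nil => intro p acc; simp [pvTrans]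
  | cons x t ih =>
    intro p acc
    simp only [List.zip_cons_cons, List.foldl_cons, pvTrans]
    rw [ih x]
    by_cases h : p = x
    · simp [h]
    · simp [h]; ring

theorem pvDrop2_eq_tail (values : List (Int × Int)) :
    values.drop 2 = (values.drop 1).tail := by
  rw [← List.drop_one, List.drop_drop]

-- ===== VERDICT (by name: the statement is the Claim_ definition above) =====
theorem count_oscillations_cwnd_spec : Claim_equal_count_oscillations_cwnd := by
  intro values _hdom
  unfold Spec_count_oscillations_cwnd count_oscillations_cwnd count_oscillations_cwnd_alt
  by_cases hshort : (PySem.List.len values) < 2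
  · have h1 : values.length ≤ 1 := by simp only [PySem.List.len_eq] at hshort; omega
    rw [if_pos (by simpa [PySem.List.len_eq] using hshort),
        if_pos (by simpa [PySem.List.len_eq] using hshort)]
  · rw [if_neg hshort, if_neg hshort]
    have hA := pvFoldA_eq_loopA values (values.drop 1) 1
      (pvPairGt (PySem.List.pyGetD values 1 (0, 0)) (PySem.List.pyGetD values 0 (0, 0))) 0 rfl
    push_cast at hA
    simp only [PySem.List.len_eq]
    rw [hA, pvLoopA_eq_trans]
    have hs1 : PySem.List.slice values (some 1) none = values.drop 1 := by
      rw [show (1 : Int) = ((1 : Nat) : Int) by norm_num, PySem.List.slice_from_natCast]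
    have hs2 : PySem.List.slice values (some 2) none = values.drop 2 := by
      rw [show (2 : Int) = ((2 : Nat) : Int) by norm_num, PySem.List.slice_from_natCast]
    rw [hs1, hs2, pvDrop2_eq_tail, pvDirsFold_eq (values.drop 1), List.singleton_append,
        List.tail_cons, pvZipCount_eq_trans]
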